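-- pv_equiv track=rewrite | github.com/rahulmadhugiri/news-rec-engine | main.py | event_key
-- ===== SOURCE A (Python) =====
-- def event_key(headline: str) -> str:
--     text = str(headline).lower()
--     if any(k in text for k in ("ai", "model", "agent", "llm")):
--         return "ai_release"
--     if any(k in text for k in ("raises", "series", "funding", "acquire")):
--         return "funding"
--     if any(k in text for k in ("earnings", "revenue", "profit")):
--         return "earnings"
--     if any(k in text for k in ("law", "policy", "regulation", "sanction")):
--         return "regulation"
--     if any(k in text for k in ("hack", "breach", "cyber", "security")):
--         return "security"
--     if any(k in text for k in ("launch", "announces", "unveils", "introduces")):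
--         return "product_launch"
--     return "other"
-- ===== SOURCE B (Python) =====
-- _KEYWORDS = {
--     "ai": 0, "model": 0, "agent": 0, "llm": 0,
--     "raises": 1, "series": 1, "funding": 1, "acquire": 1,
--     "earnings": 2, "revenue": 2, "profit": 2,
--     "law": 3, "policy": 3, "regulation": 3, "sanction": 3,
--     "hack": 4, "breach": 4, "cyber": 4, "security": 4,
--     "launch": 5, "announces": 5, "unveils": 5, "introduces": 5,
-- }
-- _CATS = ["ai_release", "funding", "earnings", "regulation", "security", "product_launch"]
--
--
-- def event_key(headline: str) -> str:
--     # Single left-to-right scan over the text: at each position, record the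
--     # best (lowest) priority of any keyword starting there; no per-category
--     # substring searches.
--     text = str(headline).lower()
--     best = len(_CATS)
--     for i in range(len(text)):
--         for kw, pri in _KEYWORDS.items():
--             if pri < best and text.startswith(kw, i):
--                 best = pri
--     return _CATS[best] if best < len(_CATS) else "other"
-- ===== Notes on version B (the rewrite author's own statement) =====
-- stated objective: alternative
-- what changed: Instead of testing the six category groups one after another with substring searches, B makes a single left-to-right scan over the text positions, checking a flat keyword-to-priority map at each position and keeping the minimum priority matched, then maps that priority back to its category name.
import Mathlib
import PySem

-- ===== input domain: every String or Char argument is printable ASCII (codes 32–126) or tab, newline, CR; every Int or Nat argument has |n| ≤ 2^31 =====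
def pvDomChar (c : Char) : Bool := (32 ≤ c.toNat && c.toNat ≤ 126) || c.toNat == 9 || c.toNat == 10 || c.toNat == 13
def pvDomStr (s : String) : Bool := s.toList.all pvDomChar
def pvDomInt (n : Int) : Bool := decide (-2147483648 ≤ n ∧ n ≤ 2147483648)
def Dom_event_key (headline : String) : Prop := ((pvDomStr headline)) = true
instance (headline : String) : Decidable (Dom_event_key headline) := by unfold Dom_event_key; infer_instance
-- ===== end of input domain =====

-- B replaces A's per-category substring tests by a single left-to-right scan over the
-- text positions that keeps the minimum priority of any keyword starting at a position
-- (alternative traversal; same cost, same return values).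

-- ===== PORT A =====
def event_key (headline : String) : String :=
  let text := PySem.Str.lower headline
  if ["ai", "model", "agent", "llm"].any (fun k => PySem.Str.isIn k text) then "ai_release"
  else if ["raises", "series", "funding", "acquire"].any (fun k => PySem.Str.isIn k text) then "funding"
  else if ["earnings", "revenue", "profit"].any (fun k => PySem.Str.isIn k text) then "earnings"
  else if ["law", "policy", "regulation", "sanction"].any (fun k => PySem.Str.isIn k text) then "regulation"
  else if ["hack", "breach", "cyber", "security"].any (fun k => PySem.Str.isIn k text) then "security"
  else if ["launch", "announces", "unveils", "introduces"].any (fun k => PySem.Str.isIn k text) then "product_launch"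
  else "other"

-- ===== PORT B =====
-- the flat keyword → priority map (Source B's _KEYWORDS, in insertion order), on the char-list side
def evKws : List (List Char × Nat) :=
  [("ai".toList, 0), ("model".toList, 0), ("agent".toList, 0), ("llm".toList, 0),
   ("raises".toList, 1), ("series".toList, 1), ("funding".toList, 1), ("acquire".toList, 1),
   ("earnings".toList, 2), ("revenue".toList, 2), ("profit".toList, 2),
   ("law".toList, 3), ("policy".toList, 3), ("regulation".toList, 3), ("sanction".toList, 3),
   ("hack".toList, 4), ("breach".toList, 4), ("cyber".toList, 4), ("security".toList, 4),
   ("launch".toList, 5), ("announces".toList, 5), ("unveils".toList, 5), ("introduces".toList, 5)]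

def evCats : List String :=
  ["ai_release", "funding", "earnings", "regulation", "security", "product_launch"]

-- one position i: 'for kw, pri in _KEYWORDS.items(): if pri < best and text.startswith(kw, i): best = pri'
-- (text.startswith(kw, i) is exactly: kw is a prefix of the suffix of text at i)
def evStep (s : List Char) (best : Nat) : Nat :=
  evKws.foldl (fun b p => if p.2 < b ∧ PySem.Chars.startswith s p.1 then p.2 else b) best

-- 'for i in range(len(text))': walk the suffixes of the text left to right
def evScan : List Char → Nat → Nat
  | [], best => best
  | c :: t, best => evScan t (evStep (c :: t) best)

def event_key_alt (headline : String) : String :=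
  let text := (PySem.Str.lower headline).toList
  let best := evScan text evCats.length
  if best < evCats.length then evCats.getD best "other" else "other"

-- ===== PRECONDITION & SPEC =====
def Spec_event_key (headline : String) (out : String) : Prop := out = event_key_alt headline
instance (headline : String) (out : String) : Decidable (Spec_event_key headline out) := by unfold Spec_event_key; infer_instance

-- ===== CLAIM (what is proved, stated in full; the proofs are below) =====
def Claim_equal_event_key : Prop := ∀ (headline : String), Dom_event_key headline → Spec_event_key headline (event_key headline)

-- ===== LEMMAS AND PROOFS =====

-- the running-minimum fold shape of evStep, with an abstract per-keyword test P
def pvMin (P : List Char × Nat → Prop) [DecidablePred P]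
    (L : List (List Char × Nat)) (b : Nat) : Nat :=
  L.foldl (fun b p => if P p then min b p.2 else b) b

theorem pvMin_le (P : List Char × Nat → Prop) [DecidablePred P]
    (L : List (List Char × Nat)) (b : Nat) : pvMin P L b ≤ b := by
  induction L generalizing b with
  | nil => simp [pvMin]
  | cons p t ih =>
    simp only [pvMin, List.foldl_cons]
    split_ifs with h
    · exact le_trans (ih _) (Nat.min_le_left _ _)
    · exact ih b

theorem pvMin_min (P : List Char × Nat → Prop) [DecidablePred P]
    (L : List (List Char × Nat)) (b1 b2 : Nat) :
    pvMin P L (min b1 b2) = min b1 (pvMin P L b2) := by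
  induction L generalizing b2 with
  | nil => simp [pvMin]
  | cons p t ih =>
    simp only [pvMin, List.foldl_cons]
    split_ifs with h
    · rw [Nat.min_assoc]; exact ih _
    · exact ih b2

theorem pvMin_congr (P Q : List Char × Nat → Prop) [DecidablePred P] [DecidablePred Q]
    (L : List (List Char × Nat)) (b : Nat) (h : ∀ p ∈ L, P p ↔ Q p) :
    pvMin P L b = pvMin Q L b := by
  induction L generalizing b with
  | nil => rfl
  | cons p t ih =>
    simp only [pvMin, List.foldl_cons]
    rw [if_congr (h p (List.mem_cons_self)) rfl rfl]
    exact ih _ (fun q hq => h q (List.mem_cons_of_mem _ hq))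

theorem pvMin_false (P : List Char × Nat → Prop) [DecidablePred P]
    (L : List (List Char × Nat)) (b : Nat) (h : ∀ p ∈ L, ¬ P p) :
    pvMin P L b = b := by
  induction L generalizing b with
  | nil => rfl
  | cons p t ih =>
    simp only [pvMin, List.foldl_cons]
    rw [if_neg (h p (List.mem_cons_self))]
    exact ih _ (fun q hq => h q (List.mem_cons_of_mem _ hq))

theorem pvMin_or (P Q : List Char × Nat → Prop) [DecidablePred P] [DecidablePred Q]
    (L : List (List Char × Nat)) (b : Nat) :
    pvMin (fun p => P p ∨ Q p) L b = pvMin Q L (pvMin P L b) := by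
  induction L generalizing b with
  | nil => rfl
  | cons p t ih =>
    simp only [pvMin, List.foldl_cons]
    by_cases hP : P p <;> by_cases hQ : Q p
    · rw [if_pos (Or.inl hP), if_pos hP, if_pos hQ]
      have habs : min (pvMin P t (min b p.2)) p.2 = pvMin P t (min b p.2) := by
        have h1 := pvMin_le P t (min b p.2)
        have h2 : min b p.2 ≤ p.2 := Nat.min_le_right _ _
        omega
      show pvMin (fun p => P p ∨ Q p) t (min b p.2) = pvMin Q t (min (pvMin P t (min b p.2)) p.2)
      rw [habs]; exact ih _
    · rw [if_pos (Or.inl hP), if_pos hP, if_neg hQ]; exact ih _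
    · rw [if_pos (Or.inr hQ), if_neg hP, if_pos hQ]
      show pvMin (fun p => P p ∨ Q p) t (min b p.2) = pvMin Q t (min (pvMin P t b) p.2)
      have hc : min (pvMin P t b) p.2 = pvMin P t (min b p.2) := by
        rw [Nat.min_comm b p.2, pvMin_min P t p.2 b, Nat.min_comm]
      rw [hc]; exact ih _
    · rw [if_neg (by tauto), if_neg hP, if_neg hQ]; exact ih b

-- evStep is the pvMin fold with the prefix-at-this-position test
theorem evStep_eq (s : List Char) (b : Nat) :
    evStep s b = pvMin (fun p => p.1 <+: s) evKws b := by
  unfold evStep pvMin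
  apply PySem.List.foldl_congr_mem
  intro acc p _
  by_cases h : p.1 <+: s
  · by_cases hl : p.2 < acc
    · rw [if_pos ⟨hl, List.isPrefixOf_iff_prefix.mpr h⟩, if_pos h]; omega
    · rw [if_neg (by omega), if_pos h]; omega
  · rw [if_neg (fun hc => h (List.isPrefixOf_iff_prefix.mp hc.2)), if_neg h]

-- the whole scan computes the minimum priority over keywords that occur anywhere (infix)
theorem evScan_eq (s : List Char) (b : Nat) :
    evScan s b = pvMin (fun p => p.1 <:+: s) evKws b := by
  induction s generalizing b with
  | nil =>
    rw [evScan, pvMin_false]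
    intro p hp h
    rw [List.infix_nil] at h
    fin_cases hp <;> exact absurd h (by decide)
  | cons c t ih =>
    rw [evScan, ih, evStep_eq,
        pvMin_congr (fun p => p.1 <:+: c :: t) (fun p => p.1 <+: c :: t ∨ p.1 <:+: t)
          evKws b (fun p _ => List.infix_cons_iff),
        pvMin_or]

-- group-by-priority reduction: over a block of constant priority i, pvMin is a single test
theorem pvMin_const (P : List Char × Nat → Prop) [DecidablePred P]
    (L : List (List Char × Nat)) (i b : Nat) (h : ∀ p ∈ L, p.2 = i) :
    pvMin P L b = if ∃ p ∈ L, P p then min b i else b := by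
  induction L generalizing b with
  | nil => simp [pvMin]
  | cons p t ih =>
    have hpi : p.2 = i := h p (List.mem_cons_self)
    have ht : ∀ q ∈ t, q.2 = i := fun q hq => h q (List.mem_cons_of_mem _ hq)
    simp only [pvMin, List.foldl_cons]
    by_cases hP : P p
    · rw [if_pos hP]
      have := ih (min b p.2) ht
      rw [pvMin] at this
      rw [this, hpi]
      have hEx : ∃ q ∈ p :: t, P q := ⟨p, List.mem_cons_self, hP⟩
      rw [if_pos hEx]
      split_ifs <;> omega
    · rw [if_neg hP]
      have := ih b ht
      rw [pvMin] at this
      rw [this]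
      have : (∃ q ∈ t, P q) ↔ (∃ q ∈ p :: t, P q) := by
        constructor
        · rintro ⟨q, hq, h1⟩; exact ⟨q, List.mem_cons_of_mem _ hq, h1⟩
        · rintro ⟨q, hq, h1⟩
          rcases List.mem_cons.mp hq with rfl | hq
          · exact absurd h1 hP
          · exact ⟨q, hq, h1⟩
      rw [if_congr this rfl rfl]

-- the six priority groups of evKws, for the group-by-priority reduction
def evG0 : List (List Char × Nat) := [("ai".toList, 0), ("model".toList, 0), ("agent".toList, 0), ("llm".toList, 0)]
def evG1 : List (List Char × Nat) := [("raises".toList, 1), ("series".toList, 1), ("funding".toList, 1), ("acquire".toList, 1)]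
def evG2 : List (List Char × Nat) := [("earnings".toList, 2), ("revenue".toList, 2), ("profit".toList, 2)]
def evG3 : List (List Char × Nat) := [("law".toList, 3), ("policy".toList, 3), ("regulation".toList, 3), ("sanction".toList, 3)]
def evG4 : List (List Char × Nat) := [("hack".toList, 4), ("breach".toList, 4), ("cyber".toList, 4), ("security".toList, 4)]
def evG5 : List (List Char × Nat) := [("launch".toList, 5), ("announces".toList, 5), ("unveils".toList, 5), ("introduces".toList, 5)]

theorem evKws_split : evKws = evG0 ++ (evG1 ++ (evG2 ++ (evG3 ++ (evG4 ++ evG5)))) := rfl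

theorem pvMin_append (P : List Char × Nat → Prop) [DecidablePred P]
    (L1 L2 : List (List Char × Nat)) (b : Nat) :
    pvMin P (L1 ++ L2) b = pvMin P L2 (pvMin P L1 b) := List.foldl_append ..

-- ===== VERDICT (by name: the statement is the Claim_ definition above) =====
set_option maxHeartbeats 1000000 in
theorem event_key_spec : Claim_equal_event_key := by
  intro headline _
  unfold Spec_event_key event_key event_key_alt
  dsimp only [evCats, List.length]
  rw [evScan_eq, evKws_split, pvMin_append, pvMin_append, pvMin_append, pvMin_append,
      pvMin_append,
      pvMin_const _ evG0 0 _ (by decide), pvMin_const _ evG1 1 _ (by decide),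
      pvMin_const _ evG2 2 _ (by decide), pvMin_const _ evG3 3 _ (by decide),
      pvMin_const _ evG4 4 _ (by decide), pvMin_const _ evG5 5 _ (by decide)]
  simp only [evG0, evG1, evG2, evG3, evG4, evG5]
  simp [PySem.Chars.isIn_iff_infix]
  set t := PySem.Chars.lower headline.toList with ht
  by_cases h0 : ['a','i'] <:+: t ∨ ['m','o','d','e','l'] <:+: t ∨ ['a','g','e','n','t'] <:+: t ∨ ['l','l','m'] <:+: t <;>
  by_cases h1 : ['r','a','i','s','e','s'] <:+: t ∨ ['s','e','r','i','e','s'] <:+: t ∨ ['f','u','n','d','i','n','g'] <:+: t ∨ ['a','c','q','u','i','r','e'] <:+: t <;>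
  by_cases h2 : ['e','a','r','n','i','n','g','s'] <:+: t ∨ ['r','e','v','e','n','u','e'] <:+: t ∨ ['p','r','o','f','i','t'] <:+: t <;>
  by_cases h3 : ['l','a','w'] <:+: t ∨ ['p','o','l','i','c','y'] <:+: t ∨ ['r','e','g','u','l','a','t','i','o','n'] <:+: t ∨ ['s','a','n','c','t','i','o','n'] <:+: t <;>
  by_cases h4 : ['h','a','c','k'] <:+: t ∨ ['b','r','e','a','c','h'] <:+: t ∨ ['c','y','b','e','r'] <:+: t ∨ ['s','e','c','u','r','i','t','y'] <:+: t <;>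
  by_cases h5 : ['l','a','u','n','c','h'] <:+: t ∨ ['a','n','n','o','u','n','c','e','s'] <:+: t ∨ ['u','n','v','e','i','l','s'] <:+: t ∨ ['i','n','t','r','o','d','u','c','e','s'] <:+: t <;>
  simp_all
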